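-- pv_equiv track=rewrite | github.com/EdenElbaz10/HW1 | q1.py | trifeca
-- ===== SOURCE A (Python) =====
-- def trifeca(word: str) ->bool:
--     l = len(word)
--     if l >= 6:
--         x = 0
--         for i in range(0, l-1, 2):
--             if word[i] == word[i + 1]:
--                 x += 1
--             else:
--                 x = 0
--             if x == 3:
--                 return True
--         x = 0
--         for i in range(1, l-1, 2):
--             if word[i] == word[i + 1]:
--                 x += 1
--             else:
--                 x = 0
--             if x == 3:
--                 return True
--     return False
-- ===== SOURCE B (Python) =====
-- def trifeca(word: str) -> bool:
--     return any(word[j] == word[j + 1]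
--                and word[j + 2] == word[j + 3]
--                and word[j + 4] == word[j + 5]
--                for j in range(len(word) - 5))
-- ===== Notes on version B (the rewrite author's own statement) =====
-- stated objective: simpler
-- what changed: Replaced A's two parity passes with a resetting run-length counter by a single sliding-window scan that tests the three doubled pairs at each start offset directly.
import Mathlib
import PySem

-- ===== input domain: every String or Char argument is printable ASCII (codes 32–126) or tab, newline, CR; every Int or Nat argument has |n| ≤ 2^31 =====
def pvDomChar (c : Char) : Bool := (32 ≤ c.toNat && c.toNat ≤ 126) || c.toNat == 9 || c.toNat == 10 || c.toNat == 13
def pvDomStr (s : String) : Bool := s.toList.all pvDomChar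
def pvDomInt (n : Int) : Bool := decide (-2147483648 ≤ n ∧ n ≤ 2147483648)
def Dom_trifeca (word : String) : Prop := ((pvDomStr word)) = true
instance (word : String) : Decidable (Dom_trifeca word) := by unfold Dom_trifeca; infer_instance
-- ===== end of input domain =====

-- B replaces A's two parity passes with a resetting counter by one sliding-window scan; objective: simpler.

-- ===== PORT A =====
-- one 'for i in range(…)' pass of A with counter x and early 'return True';
-- word[i] is ported as pyGetD: every index the loop reads satisfies i+1 ≤ l-1 < l,
-- so the default ' ' is never used and the port is exact.
def trifecaPass (cs : List Char) (idxs : List Int) (x : Int) : Bool :=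
  match idxs with
  | [] => false
  | i :: rest =>
    let x' : Int := if PySem.List.pyGetD cs i ' ' == PySem.List.pyGetD cs (i + 1) ' ' then x + 1 else 0
    if x' == 3 then true else trifecaPass cs rest x'

def trifeca (word : String) : Bool :=
  let cs := word.toList
  let l : Int := cs.length
  if l ≥ 6 then
    trifecaPass cs (PySem.List.pyRange 0 (l - 1) 2) 0 ||
    trifecaPass cs (PySem.List.pyRange 1 (l - 1) 2) 0
  else false

-- ===== PORT B =====
def trifeca_alt (word : String) : Bool :=
  let cs := word.toList
  let l : Int := cs.length
  (PySem.List.pyRange 0 (l - 5) 1).any (fun j =>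
    (PySem.List.pyGetD cs j ' ' == PySem.List.pyGetD cs (j + 1) ' ') &&
    (PySem.List.pyGetD cs (j + 2) ' ' == PySem.List.pyGetD cs (j + 3) ' ') &&
    (PySem.List.pyGetD cs (j + 4) ' ' == PySem.List.pyGetD cs (j + 5) ' '))

-- ===== PRECONDITION & SPEC =====
def Spec_trifeca (word : String) (out : Bool) : Prop := out = trifeca_alt word
instance (word : String) (out : Bool) : Decidable (Spec_trifeca word out) := by unfold Spec_trifeca; infer_instance

-- ===== CLAIM (what is proved, stated in full; the proofs are below) =====
def Claim_equal_trifeca : Prop := ∀ (word : String), Dom_trifeca word → Spec_trifeca word (trifeca word)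

-- ===== LEMMAS AND PROOFS =====

-- "cs has a doubled pair at index i"
def dd (cs : List Char) (i : Int) : Bool :=
  PySem.List.pyGetD cs i ' ' == PySem.List.pyGetD cs (i + 1) ' '

-- Characterisation of one counter pass: it returns true iff either the credit x plus a
-- run of doubled pairs from the start of the index list reaches 3, or some 3 consecutive
-- entries of the index list all carry doubled pairs.
theorem trifecaPass_iff (cs : List Char) (idxs : List Int) (x : Int)
    (hx0 : 0 ≤ x) (hx2 : x ≤ 2) :
    trifecaPass cs idxs x = true ↔
      ((∃ k : Nat, k < idxs.length ∧ 3 ≤ x + k + 1 ∧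
          ∀ t : Nat, t ≤ k → dd cs (idxs.getD t 0) = true) ∨
       (∃ k : Nat, k + 3 ≤ idxs.length ∧ dd cs (idxs.getD k 0) = true ∧
          dd cs (idxs.getD (k + 1) 0) = true ∧ dd cs (idxs.getD (k + 2) 0) = true)) := by
  induction idxs generalizing x with
  | nil => simp [trifecaPass]
  | cons i rest ih =>
    by_cases hdi : dd cs i = true
    · by_cases hx : x = 2
      · subst hx
        have lhs : trifecaPass cs (i :: rest) 2 = true := by
          simp only [trifecaPass]
          unfold dd at hdi
          simp [hdi]
        rw [lhs]
        constructor
        · intro _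
          refine Or.inl ⟨0, by simp, by omega, ?_⟩
          intro t ht
          interval_cases t
          simpa using hdi
        · intro _; rfl
      · have step : trifecaPass cs (i :: rest) x = trifecaPass cs rest (x + 1) := by
          simp only [trifecaPass]
          unfold dd at hdi
          simp only [hdi, if_true]
          have h3 : ¬ ((x + 1 : Int) == 3) = true := by simp; omega
          simp [h3]
        rw [step, ih (x + 1) (by omega) (by omega)]
        constructor
        · rintro (⟨k, hk, h3, hrun⟩ | ⟨k, hk, h1, h2, h3'⟩)
          · -- run from start of rest with credit x+1 → run from start of i::rest
            refine Or.inl ⟨k + 1, by simpa using Nat.succ_lt_succ hk, by omega, ?_⟩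
            intro t ht
            cases t with
            | zero => simpa [List.getD_cons_zero] using hdi
            | succ t' => rw [List.getD_cons_succ]; exact hrun t' (by omega)
          · exact Or.inr ⟨k + 1, by simpa using Nat.succ_le_succ hk,
              by simpa [List.getD_cons_succ] using h1,
              by simpa [List.getD_cons_succ] using h2,
              by simpa [List.getD_cons_succ] using h3'⟩
        · rintro (⟨k, hk, h3, hrun⟩ | ⟨k, hk, h1, h2, h3'⟩)
          · -- k ≥ 1 since x ≤ 1
            have hk1 : 1 ≤ k := by omega
            refine Or.inl ⟨k - 1, by simp at hk; omega, by omega, ?_⟩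
            intro t ht
            have := hrun (t + 1) (by omega)
            rwa [List.getD_cons_succ] at this
          · cases k with
            | zero =>
              -- d i, d rest[0], d rest[1]: a start run of length 2 in rest, credit x+1 ≥ 1
              simp only [List.length_cons] at hk
              refine Or.inl ⟨1, by omega, by omega, ?_⟩
              intro t ht
              interval_cases t
              · simpa [List.getD_cons_succ] using h2
              · simpa [List.getD_cons_succ] using h3'
            | succ k' =>
              refine Or.inr ⟨k', by simp at hk; omega, ?_, ?_, ?_⟩
              · simpa [List.getD_cons_succ] using h1
              · simpa [List.getD_cons_succ] using h2
              · simpa [List.getD_cons_succ] using h3'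
    · -- pair at i fails: counter resets to 0
      have step : trifecaPass cs (i :: rest) x = trifecaPass cs rest 0 := by
        simp only [trifecaPass]
        unfold dd at hdi
        simp only [Bool.not_eq_true] at hdi
        simp [hdi]
      rw [step, ih 0 (by omega) (by omega)]
      constructor
      · rintro (⟨k, hk, h3, hrun⟩ | ⟨k, hk, h1, h2, h3'⟩)
        · -- 3 ≤ 0+k+1 → k ≥ 2 → internal run in rest → internal run in i::rest
          refine Or.inr ⟨k - 2 + 1, by simp at hk ⊢; omega, ?_, ?_, ?_⟩
          · rw [List.getD_cons_succ]; exact hrun (k - 2) (by omega)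
          · rw [show k - 2 + 1 + 1 = (k - 1) + 1 by omega, List.getD_cons_succ]
            exact hrun (k - 1) (by omega)
          · rw [show k - 2 + 1 + 2 = k + 1 by omega, List.getD_cons_succ]
            exact hrun k (by omega)
        · exact Or.inr ⟨k + 1, by simp at hk ⊢; omega,
            by simpa [List.getD_cons_succ] using h1,
            by simpa [List.getD_cons_succ] using h2,
            by simpa [List.getD_cons_succ] using h3'⟩
      · rintro (⟨k, hk, h3, hrun⟩ | ⟨k, hk, h1, h2, h3'⟩)
        · -- a start run in i::rest would need d i = true at t = 0: contradiction
          have h0 := hrun 0 (by omega)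
          rw [List.getD_cons_zero] at h0
          exact absurd h0 hdi
        · cases k with
          | zero =>
            rw [List.getD_cons_zero] at h1
            exact absurd h1 hdi
          | succ k' =>
            refine Or.inr ⟨k', by simp at hk; omega, ?_, ?_, ?_⟩
            · simpa [List.getD_cons_succ] using h1
            · simpa [List.getD_cons_succ] using h2
            · simpa [List.getD_cons_succ] using h3'

-- with zero credit the start-run disjunct is subsumed: true iff 3 consecutive doubled entries
theorem trifecaPass_zero_iff (cs : List Char) (idxs : List Int) :
    trifecaPass cs idxs 0 = true ↔
      ∃ k : Nat, k + 3 ≤ idxs.length ∧ dd cs (idxs.getD k 0) = true ∧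
        dd cs (idxs.getD (k + 1) 0) = true ∧ dd cs (idxs.getD (k + 2) 0) = true := by
  rw [trifecaPass_iff cs idxs 0 le_rfl (by omega)]
  constructor
  · rintro (⟨k, hk, h3, hrun⟩ | h)
    · refine ⟨k - 2, by omega, ?_, ?_, ?_⟩
      · exact hrun (k - 2) (by omega)
      · rw [show k - 2 + 1 = k - 1 by omega]; exact hrun (k - 1) (by omega)
      · rw [show k - 2 + 2 = k by omega]; exact hrun k (by omega)
    · exact h
  · exact Or.inr

-- a step-2 pass over range(a, b, 2), b = l-1, phrased by start offsets a + 2k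
theorem trifecaPass_range_iff (cs : List Char) (a b : Int) (hab : a < b) :
    trifecaPass cs (PySem.List.pyRange a b 2) 0 = true ↔
      ∃ k : Nat, (k : Int) + 3 ≤ (b - a + 1) / 2 ∧ dd cs (a + 2 * k) = true ∧
        dd cs (a + 2 * k + 2) = true ∧ dd cs (a + 2 * k + 4) = true := by
  rw [trifecaPass_zero_iff]
  have hr : PySem.List.pyRange a b 2 =
      List.map (fun k : Nat => a + 2 * (k : Int)) (List.range ((b - a + 2 - 1) / 2).toNat) := by
    rw [PySem.List.pyRange_of_pos a b (by norm_num), if_pos hab]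
  rw [hr]
  constructor
  · rintro ⟨k, hk, h1, h2, h3⟩
    simp only [List.length_map, List.length_range] at hk
    rw [PySem.List.getD_map_range _ _ _ _ (by omega)] at h1
    rw [PySem.List.getD_map_range _ _ _ _ (by omega)] at h2
    rw [PySem.List.getD_map_range _ _ _ _ (by omega)] at h3
    refine ⟨k, by omega, h1, ?_, ?_⟩
    · rw [show a + 2 * (k : Int) + 2 = a + 2 * ((k + 1 : Nat) : Int) by push_cast; ring]
      exact h2
    · rw [show a + 2 * (k : Int) + 4 = a + 2 * ((k + 2 : Nat) : Int) by push_cast; ring]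
      exact h3
  · rintro ⟨k, hk, h1, h2, h3⟩
    refine ⟨k, by simp only [List.length_map, List.length_range]; omega, ?_, ?_, ?_⟩
    · rw [PySem.List.getD_map_range _ _ _ _ (by omega)]; exact h1
    · rw [PySem.List.getD_map_range _ _ _ _ (by omega)]
      rw [show a + 2 * ((k + 1 : Nat) : Int) = a + 2 * (k : Int) + 2 by push_cast; ring]
      exact h2
    · rw [PySem.List.getD_map_range _ _ _ _ (by omega)]
      rw [show a + 2 * ((k + 2 : Nat) : Int) = a + 2 * (k : Int) + 4 by push_cast; ring]
      exact h3

theorem trifeca_alt_iff (word : String) :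
    trifeca_alt word = true ↔
      ∃ j : Int, 0 ≤ j ∧ j < (word.toList.length : Int) - 5 ∧
        dd word.toList j = true ∧ dd word.toList (j + 2) = true ∧
        dd word.toList (j + 4) = true := by
  simp only [trifeca_alt, List.any_eq_true, PySem.List.mem_pyRange_one, Bool.and_eq_true,
    and_assoc]
  unfold dd
  have e2 : ∀ j : ℤ, j + 2 + 1 = j + 3 := fun j => by ring
  have e4 : ∀ j : ℤ, j + 4 + 1 = j + 5 := fun j => by ring
  simp only [e2, e4]

-- ===== VERDICT (by name: the statement is the Claim_ definition above) =====
theorem trifeca_spec : Claim_equal_trifeca := by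
  unfold Claim_equal_trifeca Spec_trifeca
  intro word _
  set cs := word.toList with hcs
  set l : Int := (cs.length : Int) with hl
  by_cases h6 : l ≥ 6
  · have hA : trifeca word = (trifecaPass cs (PySem.List.pyRange 0 (l - 1) 2) 0 ||
        trifecaPass cs (PySem.List.pyRange 1 (l - 1) 2) 0) := by
      simp only [trifeca, ← hcs, ← hl, if_pos h6]
    rw [hA, Bool.eq_iff_iff, Bool.or_eq_true,
        trifecaPass_range_iff cs 0 (l - 1) (by omega),
        trifecaPass_range_iff cs 1 (l - 1) (by omega),
        trifeca_alt_iff, ← hcs, ← hl]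
    constructor
    · rintro (⟨k, hk, h1, h2, h3⟩ | ⟨k, hk, h1, h2, h3⟩)
      · exact ⟨0 + 2 * k, by omega, by omega, h1, h2, h3⟩
      · exact ⟨1 + 2 * k, by omega, by omega, h1, h2, h3⟩
    · rintro ⟨j, h0, h5, h1, h2, h3⟩
      rcases Int.even_or_odd j with ⟨m, hm⟩ | ⟨m, hm⟩
      · refine Or.inl ⟨m.toNat, by omega, ?_, ?_, ?_⟩
        · rw [show (0 : Int) + 2 * (m.toNat : Int) = j by omega]; exact h1
        · rw [show (0 : Int) + 2 * (m.toNat : Int) + 2 = j + 2 by omega]; exact h2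
        · rw [show (0 : Int) + 2 * (m.toNat : Int) + 4 = j + 4 by omega]; exact h3
      · refine Or.inr ⟨m.toNat, by omega, ?_, ?_, ?_⟩
        · rw [show (1 : Int) + 2 * (m.toNat : Int) = j by omega]; exact h1
        · rw [show (1 : Int) + 2 * (m.toNat : Int) + 2 = j + 2 by omega]; exact h2
        · rw [show (1 : Int) + 2 * (m.toNat : Int) + 4 = j + 4 by omega]; exact h3
  · have hA : trifeca word = false := by
      simp only [trifeca, ← hcs, ← hl, if_neg h6]
    have hB : trifeca_alt word = false := by
      simp only [trifeca_alt, ← hcs, ← hl]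
      rw [PySem.List.pyRange_one_eq_nil (by omega)]
      rfl
    rw [hA, hB]
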